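-- pv_equiv track=rewrite | github.com/mccrmck/Coastline-Paradox | slettnes.py | strToBin
-- ===== SOURCE A (Python) =====
-- def strToBin(inString):
--     array = []
--     out = []
--     for i in inString:
--         val = bin(ord(i))[2:]
--         array.append(val)
--
--     for i in list(''.join(array)):
--         out.append(int(i))
--
--     return out
-- ===== SOURCE B (Python) =====
-- def strToBin(inString):
--     out = []
--     for c in inString:
--         v = ord(c)
--         n = v.bit_length() or 1
--         for k in range(n - 1, -1, -1):
--             out.append((v >> k) & 1)
--     return out
-- ===== Notes on version B (the rewrite author's own statement) =====
-- stated objective: idiomatic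
-- what changed: B replaces the bin()-string/join/int-parsing pipeline with direct arithmetic bit extraction: for each character it shifts ord(c) and masks with &1 in one pass, never building or parsing intermediate strings.
import Mathlib
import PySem

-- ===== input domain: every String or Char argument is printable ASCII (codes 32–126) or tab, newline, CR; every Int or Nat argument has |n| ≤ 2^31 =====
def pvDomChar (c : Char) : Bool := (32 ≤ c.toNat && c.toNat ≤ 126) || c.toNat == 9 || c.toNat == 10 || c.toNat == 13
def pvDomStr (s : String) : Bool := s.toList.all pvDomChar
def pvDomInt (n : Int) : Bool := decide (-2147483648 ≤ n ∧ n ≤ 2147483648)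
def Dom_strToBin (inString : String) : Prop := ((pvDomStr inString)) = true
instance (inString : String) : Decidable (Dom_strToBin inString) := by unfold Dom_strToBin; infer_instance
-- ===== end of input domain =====

-- ===== PORT A =====
-- B replaces bin()-string building/joining/parsing by direct shift-and-mask bit extraction (objective: idiomatic).
-- int(i) on a single bin-digit char; the digits are always '0'/'1' so ofChars? is always some (getD 0 is unreachable)
def strToBin (inString : String) : List Int :=
  let array : List (List Char) :=
    inString.toList.foldl
      (fun array i => array ++ [PySem.List.slice (PySem.Int.toBinChars0b ((i.toNat : Int))) (some 2) none]) []
  let joined : List Char := PySem.Chars.join [] array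
  joined.foldl (fun out i => out ++ [(PySem.Int.ofChars? [i]).getD 0]) []

-- ===== PORT B =====
-- (v >> k) & 1: k ranges over range(n-1,-1,-1) with n ≥ 1, so k ≥ 0 and k.toNat is exact
def strToBin_alt (inString : String) : List Int :=
  inString.toList.foldl
    (fun out c =>
      let v : Int := (c.toNat : Int)
      let n : Nat := if PySem.Int.bitLength v = 0 then 1 else PySem.Int.bitLength v  -- v.bit_length() or 1
      out ++ (PySem.List.pyRange ((n : Int) - 1) (-1) (-1)).map (fun k => PySem.Int.band (v >>> k.toNat) 1))
    []

-- ===== PRECONDITION & SPEC =====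
def Spec_strToBin (inString : String) (out : List Int) : Prop := out = strToBin_alt inString
instance (inString : String) (out : List Int) : Decidable (Spec_strToBin inString out) := by unfold Spec_strToBin; infer_instance

-- ===== CLAIM (what is proved, stated in full; the proofs are below) =====
def Claim_equal_strToBin : Prop := ∀ (inString : String), Dom_strToBin inString → Spec_strToBin inString (strToBin inString)

-- ===== LEMMAS AND PROOFS =====

-- per-character results of the two ports, as functions of the code point
def pvBitsA (m : Nat) : List Int :=
  (PySem.List.slice (PySem.Int.toBinChars0b ((m : Int))) (some 2) none).map
    (fun i => (PySem.Int.ofChars? [i]).getD 0)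

def pvBitsB (m : Nat) : List Int :=
  let v : Int := (m : Int)
  let n : Nat := if PySem.Int.bitLength v = 0 then 1 else PySem.Int.bitLength v
  (PySem.List.pyRange ((n : Int) - 1) (-1) (-1)).map (fun k => PySem.Int.band (v >>> k.toNat) 1)

theorem pv_join_nil_flatten (xss : List (List Char)) :
    PySem.Chars.join [] xss = xss.flatten := by
  induction xss with
  | nil => simp [PySem.Chars.join_nil]
  | cons p rest ih =>
    cases rest with
    | nil => simp [PySem.Chars.join_singleton]
    | cons q rest' =>
      rw [PySem.Chars.join_cons_cons]
      simp [ih]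

theorem pv_flatMap_congr {α β : Type} (f g : α → List β) (l : List α)
    (h : ∀ x ∈ l, f x = g x) : l.flatMap f = l.flatMap g := by
  induction l with
  | nil => rfl
  | cons a t ih =>
    simp only [List.flatMap_cons]
    rw [h a (by simp), ih (fun x hx => h x (by simp [hx]))]

theorem pv_strToBin_eq_flatMap (s : String) :
    strToBin s = s.toList.flatMap (fun c => pvBitsA c.toNat) := by
  unfold strToBin
  rw [PySem.List.foldl_append_singleton_eq_map, List.nil_append,
      pv_join_nil_flatten, PySem.List.foldl_append_singleton_eq_map, List.nil_append]
  rw [List.map_flatten, List.flatMap_def, List.map_map]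
  rfl

theorem pv_strToBin_alt_eq_flatMap (s : String) :
    strToBin_alt s = s.toList.flatMap (fun c => pvBitsB c.toNat) := by
  unfold strToBin_alt
  rw [PySem.List.foldl_append_eq_flatMap, List.nil_append]
  rfl

theorem pv_bits_eq : ∀ m : Nat, m < 127 → pvBitsA m = pvBitsB m := by decide

-- ===== VERDICT (by name: the statement is the Claim_ definition above) =====
theorem strToBin_spec : Claim_equal_strToBin := by
  unfold Claim_equal_strToBin
  intro s hdom
  unfold Spec_strToBin
  rw [pv_strToBin_eq_flatMap, pv_strToBin_alt_eq_flatMap]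
  apply pv_flatMap_congr
  intro c hc
  apply pv_bits_eq
  have := (List.all_eq_true.mp hdom) c hc
  simp only [pvDomChar, Bool.or_eq_true, Bool.and_eq_true, decide_eq_true_eq, beq_iff_eq] at this
  omega
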